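-- pv_equiv track=rewrite | github.com/navin-09/DSA | Arrays/precomputeArray/2_D/prefixSumMatrix.py | sum_of_all_subarray_matrix
-- ===== SOURCE A (Python) =====
-- def sum_of_all_subarray_matrix(mat):
--     row = len(mat)
--     col = len(mat[0])
--
--     total_sum = 0
--
--     for i in range(row):
--        for j in range(col):
--            total_sum += mat[i][j]*(i+1)*(j+1)*(row-i)*(col-j)
--     return total_sum
-- ===== SOURCE B (Python) =====
-- def sum_of_all_subarray_matrix(mat):
--     row = len(mat)
--     col = len(mat[0])
--
--     # P[a][b] = sum of the top-left a x b block of mat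
--     P = [[0] * (col + 1)]
--     for i in range(row):
--         prev = P[-1]
--         cur = [0]
--         run = 0
--         for j in range(col):
--             run += mat[i][j]
--             cur.append(prev[j + 1] + run)
--         P.append(cur)
--
--     total_sum = 0
--     for r1 in range(row):
--         for r2 in range(r1, row):
--             for c1 in range(col):
--                 for c2 in range(c1, col):
--                     total_sum += (P[r2 + 1][c2 + 1] - P[r1][c2 + 1]
--                                   - P[r2 + 1][c1] + P[r1][c1])
--     return total_sum
-- ===== Notes on version B (the rewrite author's own statement) =====
-- stated objective: alternative
-- what changed: Replaced the per-element closed-form contribution sum by building a 2D prefix-sum matrix and enumerating every submatrix, adding each submatrix sum obtained in O(1) by inclusion-exclusion.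
import Mathlib
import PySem

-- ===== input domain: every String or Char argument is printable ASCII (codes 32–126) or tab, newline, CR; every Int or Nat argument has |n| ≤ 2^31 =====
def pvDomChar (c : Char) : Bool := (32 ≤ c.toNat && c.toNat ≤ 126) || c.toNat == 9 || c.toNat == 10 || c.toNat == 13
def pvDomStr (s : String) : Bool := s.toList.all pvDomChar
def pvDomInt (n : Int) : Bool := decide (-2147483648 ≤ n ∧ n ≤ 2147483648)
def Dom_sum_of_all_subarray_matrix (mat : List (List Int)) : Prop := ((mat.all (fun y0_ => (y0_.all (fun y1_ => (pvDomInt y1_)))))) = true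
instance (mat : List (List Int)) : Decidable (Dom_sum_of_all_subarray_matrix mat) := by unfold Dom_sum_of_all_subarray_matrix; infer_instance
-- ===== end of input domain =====

-- B replaces A's per-element contribution formula by a 2D prefix-sum matrix plus
-- inclusion-exclusion over all submatrices: a different (slower but standard) algorithm, same exact result.


-- ===== PORT A =====
def sum_of_all_subarray_matrix (mat : List (List Int)) : Int :=
  let row : Int := mat.length
  let col : Int := (PySem.List.pyGetD mat 0 []).length
  (PySem.List.pyRange 0 row 1).foldl (fun total_sum i =>
    (PySem.List.pyRange 0 col 1).foldl (fun total_sum j =>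
      total_sum + PySem.List.pyGetD (PySem.List.pyGetD mat i []) j 0 * (i + 1) * (j + 1) * (row - i) * (col - j))
      total_sum) 0

-- ===== PORT B =====
-- inner loop of Source B: builds one prefix row 'cur' from the matrix row and the previous prefix row
def pvBuildRow (mrow prev : List Int) (col : Int) : List Int :=
  ((PySem.List.pyRange 0 col 1).foldl
    (fun (st : List Int × Int) j =>
      let run := st.2 + PySem.List.pyGetD mrow j 0
      (st.1 ++ [PySem.List.pyGetD prev (j + 1) 0 + run], run))
    ([0], 0)).1

def sum_of_all_subarray_matrix_alt (mat : List (List Int)) : Int :=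
  let row : Int := mat.length
  let col : Int := (PySem.List.pyGetD mat 0 []).length
  let P : List (List Int) :=
    (PySem.List.pyRange 0 row 1).foldl
      (fun P i => P ++ [pvBuildRow (PySem.List.pyGetD mat i []) (PySem.List.pyGetD P (-1) []) col])
      [PySem.List.pyRepeat [0] (col + 1)]
  (PySem.List.pyRange 0 row 1).foldl (fun total_sum r1 =>
    (PySem.List.pyRange r1 row 1).foldl (fun total_sum r2 =>
      (PySem.List.pyRange 0 col 1).foldl (fun total_sum c1 =>
        (PySem.List.pyRange c1 col 1).foldl (fun total_sum c2 =>
          total_sum + (PySem.List.pyGetD (PySem.List.pyGetD P (r2 + 1) []) (c2 + 1) 0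
            - PySem.List.pyGetD (PySem.List.pyGetD P r1 []) (c2 + 1) 0
            - PySem.List.pyGetD (PySem.List.pyGetD P (r2 + 1) []) c1 0
            + PySem.List.pyGetD (PySem.List.pyGetD P r1 []) c1 0)) total_sum) total_sum) total_sum) 0

-- ===== PRECONDITION & SPEC =====
-- Pre_ excludes exactly the inputs where Python A raises IndexError: the empty matrix
-- (len(mat[0])) and ragged matrices with some row shorter than the first row (mat[i][j]).
def Pre_sum_of_all_subarray_matrix (mat : List (List Int)) : Prop :=
  mat ≠ [] ∧ ∀ r ∈ mat, (mat.getD 0 []).length ≤ r.length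
instance (mat : List (List Int)) : Decidable (Pre_sum_of_all_subarray_matrix mat) := by
  unfold Pre_sum_of_all_subarray_matrix; infer_instance

def pvWitness_sum_of_all_subarray_matrix : List (List Int) := [[1, 2], [3, 4]]

def Spec_sum_of_all_subarray_matrix (mat : List (List Int)) (out : Int) : Prop := out = sum_of_all_subarray_matrix_alt mat
instance (mat : List (List Int)) (out : Int) : Decidable (Spec_sum_of_all_subarray_matrix mat out) := by unfold Spec_sum_of_all_subarray_matrix; infer_instance

-- ===== CLAIM (what is proved, stated in full; the proofs are below) =====
def Claim_equal_sum_of_all_subarray_matrix : Prop := ∀ (mat : List (List Int)), Dom_sum_of_all_subarray_matrix mat → Pre_sum_of_all_subarray_matrix mat → Spec_sum_of_all_subarray_matrix mat (sum_of_all_subarray_matrix mat)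

-- ===== LEMMAS AND PROOFS =====

-- the matrix entry m[i][j] (0 outside), and the prefix sum F a b of the top-left a×b block
def pvM (mat : List (List Int)) (i j : ℕ) : Int := (mat.getD i []).getD j 0
def pvF (mat : List (List Int)) (a b : ℕ) : Int :=
  ∑ i ∈ Finset.range a, ∑ j ∈ Finset.range b, pvM mat i j
def pvRowP (mat : List (List Int)) (C a : ℕ) : List Int :=
  (List.range (C + 1)).map (fun b => pvF mat a b)

lemma pv_toNat_cast (n : ℕ) : ((n : Int)).toNat = n := by omega

-- a 'total += f(x)' loop over range(a, b) is init + a Finset sum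
lemma pv_foldl_add_pyRange (a b : Int) (f : Int → Int) (init : Int) :
    (PySem.List.pyRange a b 1).foldl (fun acc x => acc + f x) init
      = init + ∑ k ∈ Finset.range (b - a).toNat, f (a + (k : Int)) := by
  rw [PySem.List.pyRange_one, PySem.List.foldl_add, List.map_map]
  congr 1

lemma pv_pyGetD_neg_one {α : Type} (xs : List α) (a d : α) :
    PySem.List.pyGetD (xs ++ [a]) (-1) d = a := by
  simp [pysem]

lemma pv_buildRow_spec (mat : List (List Int)) (C i : ℕ) :
    pvBuildRow (PySem.List.pyGetD mat (i : Int) []) (pvRowP mat C i) (C : Int) = pvRowP mat C (i + 1) := by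
  have hFsucc : ∀ b, pvF mat (i + 1) b = pvF mat i b + ∑ j ∈ Finset.range b, pvM mat i j := by
    intro b; unfold pvF; rw [Finset.sum_range_succ]
  have key : ∀ k : ℕ, k ≤ C →
      ((List.range k).map (fun t : ℕ => (t : Int))).foldl
        (fun (st : List Int × Int) j =>
          let run := st.2 + PySem.List.pyGetD (PySem.List.pyGetD mat (i : Int) []) j 0
          (st.1 ++ [PySem.List.pyGetD (pvRowP mat C i) (j + 1) 0 + run], run))
        ([0], 0)
      = ((List.range (k + 1)).map (fun b => pvF mat (i + 1) b), ∑ j ∈ Finset.range k, pvM mat i j) := by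
    intro k
    induction k with
    | zero => intro _; simp [pvF]
    | succ k ih =>
      intro hk
      rw [List.range_succ, List.map_append, List.foldl_append, ih (by omega)]
      simp only [List.map_cons, List.map_nil, List.foldl_cons, List.foldl_nil]
      have hidx : ((k : Int) + 1) = ((k + 1 : ℕ) : Int) := by push_cast; ring
      have hprev : PySem.List.pyGetD (pvRowP mat C i) ((k : Int) + 1) 0 = pvF mat i (k + 1) := by
        rw [hidx, PySem.List.pyGetD_natCast]
        unfold pvRowP
        exact PySem.List.getD_map_range _ _ _ _ (by omega)
      have hm : PySem.List.pyGetD (PySem.List.pyGetD mat (i : Int) []) (k : Int) 0 = pvM mat i k := by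
        rw [PySem.List.pyGetD_natCast, PySem.List.pyGetD_natCast]; rfl
      simp only [hprev, hm, Prod.mk.injEq]
      refine ⟨?_, ?_⟩
      · rw [List.range_succ (n := k + 1), List.map_append]
        simp only [List.map_cons, List.map_nil, List.append_cancel_left_eq]
        rw [hFsucc (k + 1), Finset.sum_range_succ]
      · rw [Finset.sum_range_succ]
  unfold pvBuildRow
  rw [PySem.List.pyRange_zero_natCast, key C le_rfl]
  rfl

lemma pv_P_spec (mat : List (List Int)) (C R : ℕ) :
    (PySem.List.pyRange 0 (R : Int) 1).foldl
      (fun P i => P ++ [pvBuildRow (PySem.List.pyGetD mat i []) (PySem.List.pyGetD P (-1) []) (C : Int)])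
      [PySem.List.pyRepeat [0] ((C : Int) + 1)]
      = (List.range (R + 1)).map (pvRowP mat C) := by
  induction R with
  | zero =>
    rw [show ((0 : ℕ) : Int) = 0 from rfl, PySem.List.pyRange_one_eq_nil le_rfl]
    rw [List.foldl_nil, PySem.List.pyRepeat_singleton]
    rw [show ((C : Int) + 1).toNat = C + 1 from by omega]
    simp [pvRowP, pvF, List.map_const']
  | succ R ih =>
    rw [show ((R + 1 : ℕ) : Int) = (R : Int) + 1 from by push_cast; ring]
    rw [PySem.List.pyRange_one_succ_right (Int.natCast_nonneg R), List.foldl_append, ih]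
    simp only [List.foldl_cons, List.foldl_nil]
    have hneg : PySem.List.pyGetD ((List.range (R + 1)).map (pvRowP mat C)) (-1) [] = pvRowP mat C R := by
      rw [List.range_succ, List.map_append]
      exact pv_pyGetD_neg_one ((List.range R).map (pvRowP mat C)) (pvRowP mat C R) []
    rw [hneg, pv_buildRow_spec]
    conv_rhs => rw [List.range_succ (n := R + 1), List.map_append]
    simp

lemma pv_P_get (mat : List (List Int)) (C R : ℕ) (a b : ℕ) (ha : a ≤ R) (hb : b ≤ C) :
    PySem.List.pyGetD (PySem.List.pyGetD ((List.range (R + 1)).map (pvRowP mat C)) (a : Int) []) (b : Int) 0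
      = pvF mat a b := by
  simp only [PySem.List.pyGetD_natCast]
  rw [PySem.List.getD_map_range _ _ _ _ (show a < R + 1 by omega)]
  unfold pvRowP
  exact PySem.List.getD_map_range _ _ _ _ (by omega)

lemma pv_A_eq (mat : List (List Int)) :
    sum_of_all_subarray_matrix mat
      = ∑ i ∈ Finset.range mat.length, ∑ j ∈ Finset.range (mat.getD 0 []).length,
          pvM mat i j * ((i : Int) + 1) * ((j : Int) + 1) * ((mat.length : Int) - (i : Int)) * (((mat.getD 0 []).length : Int) - (j : Int)) := by
  simp only [sum_of_all_subarray_matrix, PySem.List.pyGetD_ofNat']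
  simp only [pv_foldl_add_pyRange, sub_zero, zero_add, pv_toNat_cast]
  refine Finset.sum_congr rfl fun i _ => Finset.sum_congr rfl fun j _ => ?_
  rw [PySem.List.pyGetD_natCast, PySem.List.pyGetD_natCast]
  rfl

lemma pv_B_eq (mat : List (List Int)) :
    sum_of_all_subarray_matrix_alt mat
      = ∑ r1 ∈ Finset.range mat.length, ∑ k ∈ Finset.range (mat.length - r1),
        ∑ c1 ∈ Finset.range (mat.getD 0 []).length, ∑ k2 ∈ Finset.range ((mat.getD 0 []).length - c1),
          (pvF mat (r1 + k + 1) (c1 + k2 + 1) - pvF mat r1 (c1 + k2 + 1)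
            - pvF mat (r1 + k + 1) c1 + pvF mat r1 c1) := by
  simp only [sum_of_all_subarray_matrix_alt, PySem.List.pyGetD_ofNat']
  rw [pv_P_spec]
  simp only [pv_foldl_add_pyRange, sub_zero, zero_add, pv_toNat_cast]
  refine Finset.sum_congr rfl fun r1 hr1 => ?_
  have hr1' : r1 < mat.length := Finset.mem_range.mp hr1
  rw [show ((mat.length : Int) - (r1 : Int)).toNat = mat.length - r1 from by omega]
  refine Finset.sum_congr rfl fun k hk => ?_
  have hk' : k < mat.length - r1 := Finset.mem_range.mp hk
  refine Finset.sum_congr rfl fun c1 hc1 => ?_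
  have hc1' : c1 < (mat.getD 0 []).length := Finset.mem_range.mp hc1
  rw [show (((mat.getD 0 []).length : Int) - (c1 : Int)).toNat = (mat.getD 0 []).length - c1 from by omega]
  refine Finset.sum_congr rfl fun k2 hk2 => ?_
  have hk2' : k2 < (mat.getD 0 []).length - c1 := Finset.mem_range.mp hk2
  rw [show (r1 : Int) + (k : Int) + 1 = ((r1 + k + 1 : ℕ) : Int) from by push_cast; ring]
  rw [show (c1 : Int) + (k2 : Int) + 1 = ((c1 + k2 + 1 : ℕ) : Int) from by push_cast; ring]
  rw [pv_P_get mat _ _ _ _ (by omega) (by omega), pv_P_get mat _ _ _ _ (by omega) (by omega),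
      pv_P_get mat _ _ _ _ (by omega) (by omega), pv_P_get mat _ _ _ _ (by omega) (by omega)]

lemma pv_term_eq (mat : List (List Int)) (r1 k c1 k2 : ℕ) :
    pvF mat (r1 + k + 1) (c1 + k2 + 1) - pvF mat r1 (c1 + k2 + 1)
      - pvF mat (r1 + k + 1) c1 + pvF mat r1 c1
    = ∑ i ∈ Finset.Ico r1 (r1 + k + 1), ∑ j ∈ Finset.Ico c1 (c1 + k2 + 1), pvM mat i j := by
  have h1 : ∀ i, ∑ j ∈ Finset.Ico c1 (c1 + k2 + 1), pvM mat i j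
      = ∑ j ∈ Finset.range (c1 + k2 + 1), pvM mat i j - ∑ j ∈ Finset.range c1, pvM mat i j :=
    fun i => Finset.sum_Ico_eq_sub _ (by omega)
  rw [Finset.sum_congr rfl (fun i _ => h1 i), Finset.sum_sub_distrib,
      Finset.sum_Ico_eq_sub _ (show r1 ≤ r1 + k + 1 by omega),
      Finset.sum_Ico_eq_sub _ (show r1 ≤ r1 + k + 1 by omega)]
  unfold pvF
  ring

lemma pv_count_le (n i : ℕ) (hi : i < n) :
    ∑ a ∈ Finset.range n, (if a ≤ i then (1 : ℤ) else 0) = (i : ℤ) + 1 := by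
  rw [Finset.sum_boole]
  rw [show (Finset.range n).filter (fun a => a ≤ i) = Finset.range (i + 1) from by
    ext a; simp; omega]
  rw [Finset.card_range]; push_cast; ring

lemma pv_count_ge (n i : ℕ) :
    ∑ r ∈ Finset.range n, (if i ≤ r then (1 : ℤ) else 0) = ((n - i : ℕ) : ℤ) := by
  rw [Finset.sum_boole]
  rw [show (Finset.range n).filter (fun r => i ≤ r) = Finset.Ico i n from by
    ext a; simp; omega]
  rw [Nat.card_Ico]

lemma pv_oneD (n : ℕ) (g : ℕ → ℤ) :
    ∑ a ∈ Finset.range n, ∑ k ∈ Finset.range (n - a), ∑ i ∈ Finset.Ico a (a + k + 1), g i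
      = ∑ i ∈ Finset.range n, ((i : ℤ) + 1) * ((n - i : ℕ) : ℤ) * g i := by
  have step1 : ∀ a, a < n → ∑ k ∈ Finset.range (n - a), ∑ i ∈ Finset.Ico a (a + k + 1), g i
      = ∑ r ∈ Finset.range n, ∑ i ∈ Finset.range n, (if a ≤ i ∧ i ≤ r then g i else 0) := by
    intro a ha
    rw [show ∑ k ∈ Finset.range (n - a), ∑ i ∈ Finset.Ico a (a + k + 1), g i
        = ∑ r ∈ Finset.Ico a n, ∑ i ∈ Finset.Ico a (r + 1), g i from
      (Finset.sum_Ico_eq_sum_range (fun r => ∑ i ∈ Finset.Ico a (r + 1), g i) a n).symm]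
    rw [show Finset.Ico a n = (Finset.range n).filter (fun r => a ≤ r) from by ext r; simp; omega]
    rw [Finset.sum_filter]
    refine Finset.sum_congr rfl fun r hr => ?_
    have hr' : r < n := Finset.mem_range.mp hr
    by_cases har : a ≤ r
    · rw [if_pos har]
      rw [show Finset.Ico a (r + 1) = (Finset.range n).filter (fun i => a ≤ i ∧ i ≤ r) from by
        ext i; simp; omega]
      rw [Finset.sum_filter]
    · rw [if_neg har]
      symm
      refine Finset.sum_eq_zero fun i _ => ?_
      rw [if_neg]; omega
  calc
    ∑ a ∈ Finset.range n, ∑ k ∈ Finset.range (n - a), ∑ i ∈ Finset.Ico a (a + k + 1), g i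
      = ∑ a ∈ Finset.range n, ∑ r ∈ Finset.range n, ∑ i ∈ Finset.range n,
          (if a ≤ i ∧ i ≤ r then g i else 0) :=
        Finset.sum_congr rfl fun a ha => step1 a (Finset.mem_range.mp ha)
    _ = ∑ a ∈ Finset.range n, ∑ i ∈ Finset.range n, ∑ r ∈ Finset.range n,
          (if a ≤ i ∧ i ≤ r then g i else 0) :=
        Finset.sum_congr rfl fun a _ => Finset.sum_comm
    _ = ∑ i ∈ Finset.range n, ∑ a ∈ Finset.range n, ∑ r ∈ Finset.range n,
          (if a ≤ i ∧ i ≤ r then g i else 0) := Finset.sum_comm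
    _ = ∑ i ∈ Finset.range n, ((i : ℤ) + 1) * ((n - i : ℕ) : ℤ) * g i := by
        refine Finset.sum_congr rfl fun i hi => ?_
        have hi' : i < n := Finset.mem_range.mp hi
        have hterm : ∀ a r : ℕ, (if a ≤ i ∧ i ≤ r then g i else 0)
            = (if a ≤ i then (1 : ℤ) else 0) * ((if i ≤ r then (1 : ℤ) else 0) * g i) := by
          intro a r
          by_cases h1 : a ≤ i <;> by_cases h2 : i ≤ r <;> simp [h1, h2]
        simp only [hterm]
        rw [show ∑ a ∈ Finset.range n, ∑ r ∈ Finset.range n,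
              (if a ≤ i then (1 : ℤ) else 0) * ((if i ≤ r then (1 : ℤ) else 0) * g i)
            = (∑ a ∈ Finset.range n, (if a ≤ i then (1 : ℤ) else 0))
              * ((∑ r ∈ Finset.range n, (if i ≤ r then (1 : ℤ) else 0)) * g i) from by
          rw [Finset.sum_mul]
          refine Finset.sum_congr rfl fun a _ => ?_
          rw [Finset.sum_mul, Finset.mul_sum]]
        rw [pv_count_le n i hi', pv_count_ge n i]
        ring

lemma pv_swap (C : ℕ) (s : Finset ℕ) (G : ℕ → ℕ → ℕ → ℤ) :
    ∑ c1 ∈ Finset.range C, ∑ k2 ∈ Finset.range (C - c1), ∑ i ∈ s, G c1 k2 i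
      = ∑ i ∈ s, ∑ c1 ∈ Finset.range C, ∑ k2 ∈ Finset.range (C - c1), G c1 k2 i := by
  calc
    ∑ c1 ∈ Finset.range C, ∑ k2 ∈ Finset.range (C - c1), ∑ i ∈ s, G c1 k2 i
      = ∑ c1 ∈ Finset.range C, ∑ i ∈ s, ∑ k2 ∈ Finset.range (C - c1), G c1 k2 i :=
        Finset.sum_congr rfl fun c1 _ => Finset.sum_comm
    _ = ∑ i ∈ s, ∑ c1 ∈ Finset.range C, ∑ k2 ∈ Finset.range (C - c1), G c1 k2 i := Finset.sum_comm

lemma pv_math (mat : List (List Int)) (R C : ℕ) :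
    ∑ r1 ∈ Finset.range R, ∑ k ∈ Finset.range (R - r1),
      ∑ c1 ∈ Finset.range C, ∑ k2 ∈ Finset.range (C - c1),
        (pvF mat (r1 + k + 1) (c1 + k2 + 1) - pvF mat r1 (c1 + k2 + 1)
          - pvF mat (r1 + k + 1) c1 + pvF mat r1 c1)
    = ∑ i ∈ Finset.range R, ∑ j ∈ Finset.range C,
        pvM mat i j * ((i : Int) + 1) * ((j : Int) + 1) * ((R : Int) - (i : Int)) * ((C : Int) - (j : Int)) := by
  calc
    ∑ r1 ∈ Finset.range R, ∑ k ∈ Finset.range (R - r1),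
      ∑ c1 ∈ Finset.range C, ∑ k2 ∈ Finset.range (C - c1),
        (pvF mat (r1 + k + 1) (c1 + k2 + 1) - pvF mat r1 (c1 + k2 + 1)
          - pvF mat (r1 + k + 1) c1 + pvF mat r1 c1)
      = ∑ r1 ∈ Finset.range R, ∑ k ∈ Finset.range (R - r1),
          ∑ i ∈ Finset.Ico r1 (r1 + k + 1), ∑ j ∈ Finset.range C,
            ((j : ℤ) + 1) * ((C - j : ℕ) : ℤ) * pvM mat i j := by
        refine Finset.sum_congr rfl fun r1 _ => Finset.sum_congr rfl fun k _ => ?_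
        calc
          ∑ c1 ∈ Finset.range C, ∑ k2 ∈ Finset.range (C - c1),
              (pvF mat (r1 + k + 1) (c1 + k2 + 1) - pvF mat r1 (c1 + k2 + 1)
                - pvF mat (r1 + k + 1) c1 + pvF mat r1 c1)
            = ∑ c1 ∈ Finset.range C, ∑ k2 ∈ Finset.range (C - c1),
                ∑ i ∈ Finset.Ico r1 (r1 + k + 1), ∑ j ∈ Finset.Ico c1 (c1 + k2 + 1), pvM mat i j :=
              Finset.sum_congr rfl fun c1 _ => Finset.sum_congr rfl fun k2 _ =>
                pv_term_eq mat r1 k c1 k2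
          _ = ∑ i ∈ Finset.Ico r1 (r1 + k + 1), ∑ c1 ∈ Finset.range C,
                ∑ k2 ∈ Finset.range (C - c1), ∑ j ∈ Finset.Ico c1 (c1 + k2 + 1), pvM mat i j :=
              pv_swap C _ _
          _ = ∑ i ∈ Finset.Ico r1 (r1 + k + 1), ∑ j ∈ Finset.range C,
                ((j : ℤ) + 1) * ((C - j : ℕ) : ℤ) * pvM mat i j :=
              Finset.sum_congr rfl fun i _ => pv_oneD C (fun j => pvM mat i j)
    _ = ∑ i ∈ Finset.range R, ((i : ℤ) + 1) * ((R - i : ℕ) : ℤ)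
          * (∑ j ∈ Finset.range C, ((j : ℤ) + 1) * ((C - j : ℕ) : ℤ) * pvM mat i j) :=
        pv_oneD R _
    _ = ∑ i ∈ Finset.range R, ∑ j ∈ Finset.range C,
          pvM mat i j * ((i : Int) + 1) * ((j : Int) + 1) * ((R : Int) - (i : Int)) * ((C : Int) - (j : Int)) := by
        refine Finset.sum_congr rfl fun i hi => ?_
        have hi' : i < R := Finset.mem_range.mp hi
        rw [Finset.mul_sum]
        refine Finset.sum_congr rfl fun j hj => ?_
        have hj' : j < C := Finset.mem_range.mp hj
        rw [show ((R - i : ℕ) : ℤ) = (R : ℤ) - i from by omega,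
            show ((C - j : ℕ) : ℤ) = (C : ℤ) - j from by omega]
        ring

-- ===== VERDICT (by name: the statement is the Claim_ definition above) =====
theorem sum_of_all_subarray_matrix_spec : Claim_equal_sum_of_all_subarray_matrix := by
  intro mat _ _
  unfold Spec_sum_of_all_subarray_matrix
  rw [pv_A_eq, pv_B_eq]
  exact (pv_math mat mat.length (mat.getD 0 []).length).symm
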